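-- pv_equiv track=rewrite | github.com/LeviJunior21/AnaliseTecnicaAlgoritmos | terceiro_modulo/dynamic_subsequencia_comum_maxima.py | substring_maxima
-- ===== SOURCE A (Python) =====
-- def substring_maxima(valores):
--     maximos = [0] * len(valores)
--
--     for inicio in range(len(valores) -1, -1, -1):
--         candidatos = [0]
--
--         for i in range(inicio + 1, len(valores)):
--             if valores[i] >= valores[inicio]:
--                 candidatos.append(maximos[i])
--
--         maximos[inicio] = 1 + max(candidatos)
--
--     return maximos
-- ===== SOURCE B (Python) =====
-- def substring_maxima(valores):
--     # Right-to-left scan maintaining a Pareto frontier of (value, chain length):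
--     # values strictly increasing, lengths strictly decreasing.  The best chain
--     # starting with a value >= x is the length at the first frontier entry
--     # whose value is >= x, so each element is answered by one frontier lookup
--     # instead of rescanning the whole suffix.
--     frontier = []  # (value, length), values increasing, lengths strictly decreasing
--     res = []
--     for x in reversed(valores):
--         k = 0
--         while k < len(frontier) and frontier[k][0] < x:
--             k += 1
--         d = 1 + (frontier[k][1] if k < len(frontier) else 0)
--         if k > 0 and frontier[k - 1][1] == d:
--             frontier[k - 1] = (x, d)
--         else:
--             frontier.insert(k, (x, d))
--         res.append(d)
--     res.reverse()
--     return res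
-- ===== Notes on version B (the rewrite author's own statement) =====
-- stated objective: faster
-- what changed: Replaces A's rescan of the whole suffix for every start index with a single right-to-left pass that maintains a Pareto frontier of (value, chain-length) pairs, answering each index from the frontier instead of the suffix.
import Mathlib
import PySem

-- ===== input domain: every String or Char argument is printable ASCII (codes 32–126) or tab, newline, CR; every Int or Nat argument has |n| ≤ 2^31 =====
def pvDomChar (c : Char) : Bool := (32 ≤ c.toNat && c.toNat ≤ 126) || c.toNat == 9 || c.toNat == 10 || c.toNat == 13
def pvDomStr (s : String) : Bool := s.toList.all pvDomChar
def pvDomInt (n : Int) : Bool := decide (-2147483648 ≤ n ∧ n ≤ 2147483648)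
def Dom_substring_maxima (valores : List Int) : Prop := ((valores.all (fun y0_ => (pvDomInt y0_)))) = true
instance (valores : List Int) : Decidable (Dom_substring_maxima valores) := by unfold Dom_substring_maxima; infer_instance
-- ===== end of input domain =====

-- B replaces A's rescan of the whole suffix at every index by a single right-to-left
-- pass over a Pareto frontier of (value, chain length) pairs; A = B on all inputs.

-- ===== PORT A =====
-- Literal port of A.  All indices produced by the ranges are in bounds, so pyGetD/pySetD
-- with default 0 never take their default, and candidatos starts as [0], so max? is
-- always `some` and `.getD 0` is never the default either.
def substring_maxima (valores : List Int) : List Int :=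
  let maximos := List.replicate valores.length (0 : Int)
  (PySem.List.pyRange ((valores.length : Int) - 1) (-1) (-1)).foldl
    (fun maximos inicio =>
      let candidatos :=
        (PySem.List.pyRange (inicio + 1) (valores.length : Int) 1).foldl
          (fun candidatos i =>
            if PySem.List.pyGetD valores i 0 ≥ PySem.List.pyGetD valores inicio 0 then
              candidatos ++ [PySem.List.pyGetD maximos i 0]
            else candidatos)
          [(0 : Int)]
      PySem.List.pySetD maximos inicio (1 + (PySem.List.max? candidatos (fun y => y)).getD 0))
    maximos

-- ===== PORT B =====
-- Source B's while-scan for the first frontier entry with value ≥ x, the insertion there and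
-- the conditional replacement of the left neighbour (its length == d) are exactly the
-- three branches of this structural recursion over the frontier list.
def altStep (x : Int) : List (Int × Int) → List (Int × Int) × Int
  | [] => ([(x, 1)], 1)
  | (v, m) :: rest =>
      if v < x then
        let r := altStep x rest
        (if m = r.2 then r.1 else (v, m) :: r.1, r.2)
      else ((x, m + 1) :: (v, m) :: rest, m + 1)

def substring_maxima_alt (valores : List Int) : List Int :=
  let st := valores.reverse.foldl
      (fun (st : List (Int × Int) × List Int) x =>
        let r := altStep x st.1
        (r.1, st.2 ++ [r.2]))
      (([], []) : List (Int × Int) × List Int)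
  st.2.reverse

-- ===== PRECONDITION & SPEC =====
def Spec_substring_maxima (valores : List Int) (out : List Int) : Prop := out = substring_maxima_alt valores
instance (valores : List Int) (out : List Int) : Decidable (Spec_substring_maxima valores out) := by unfold Spec_substring_maxima; infer_instance

-- ===== CLAIM (what is proved, stated in full; the proofs are below) =====
def Claim_equal_substring_maxima : Prop := ∀ (valores : List Int), Dom_substring_maxima valores → Spec_substring_maxima valores (substring_maxima valores)

-- ===== LEMMAS AND PROOFS =====

-- Common specification: dpSpec l lists, for each position, 1 + the best chain value over
-- the later positions that hold a value ≥ the value at this position.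
def best (y : Int) (pairs : List (Int × Int)) : Int :=
  ((pairs.filter (fun p => y ≤ p.1)).map (fun p => p.2)).foldl max 0

def dpSpec : List Int → List Int
  | [] => []
  | x :: xs => (1 + best x (xs.zip (dpSpec xs))) :: dpSpec xs

lemma length_dpSpec (l : List Int) : (dpSpec l).length = l.length := by
  induction l with
  | nil => rfl
  | cons x xs ih => simp [dpSpec, ih]

lemma foldl_max_pull : ∀ (l : List Int) (a b : Int), l.foldl max (max a b) = max b (l.foldl max a) := by
  intro l
  induction l with
  | nil => intro a b; exact max_comm a b
  | cons c t ih =>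
    intro a b
    simp only [List.foldl_cons]
    rw [max_right_comm a b c, ih]

-- ----- A-side: the nested loops compute dpSpec -----

lemma fold2 {β : Type} (xs ys : List Int) (g : β → Int → Int → β) (hlen : ys.length = xs.length) :
    ∀ (k a : Nat) (init : β), xs.length - a = k →
    (PySem.List.pyRange (a : Int) (xs.length : Int) 1).foldl
       (fun c i => g c (PySem.List.pyGetD xs i 0) (PySem.List.pyGetD ys i 0)) init
    = ((xs.drop a).zip (ys.drop a)).foldl (fun c p => g c p.1 p.2) init := by
  intro k
  induction k with
  | zero =>
    intro a init hk
    have ha : xs.length ≤ a := by omega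
    rw [PySem.List.pyRange_one_eq_nil (by exact_mod_cast ha)]
    rw [List.drop_eq_nil_of_le ha, List.drop_eq_nil_of_le (by omega)]
    rfl
  | succ k ih =>
    intro a init hk
    have ha : a < xs.length := by omega
    have ha' : a < ys.length := by omega
    rw [PySem.List.pyRange_one_cons (by exact_mod_cast ha)]
    rw [List.drop_eq_getElem_cons ha, List.drop_eq_getElem_cons ha']
    simp only [List.foldl_cons, List.zip_cons_cons]
    rw [PySem.List.pyGetD_natCast, PySem.List.pyGetD_natCast,
        List.getD_eq_getElem xs 0 ha, List.getD_eq_getElem ys 0 ha']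
    have hc : ((a : Int) + 1) = ((a + 1 : Nat) : Int) := by push_cast; ring
    rw [hc, ih (a + 1) _ (by omega)]

lemma stepA_eq (valores : List Int) (m : Nat) (hm : m < valores.length)
    (state : List Int)
    (hstate : state = List.replicate (m + 1) (0 : Int) ++ dpSpec (valores.drop (m + 1))) :
    (let candidatos :=
        (PySem.List.pyRange ((m : Int) + 1) (valores.length : Int) 1).foldl
          (fun candidatos i =>
            if PySem.List.pyGetD valores i 0 ≥ PySem.List.pyGetD valores (m : Int) 0 then
              candidatos ++ [PySem.List.pyGetD state i 0]
            else candidatos)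
          [(0 : Int)]
     PySem.List.pySetD state (m : Int) (1 + (PySem.List.max? candidatos (fun y => y)).getD 0))
    = List.replicate m (0 : Int) ++ dpSpec (valores.drop m) := by
  have hlen : state.length = valores.length := by
    rw [hstate]
    simp [length_dpSpec]
    omega
  have hx : PySem.List.pyGetD valores (m : Int) 0 = valores[m] := by
    rw [PySem.List.pyGetD_natCast, List.getD_eq_getElem valores 0 hm]
  have hcast : ((m : Int) + 1) = ((m + 1 : Nat) : Int) := by push_cast; ring
  rw [hx, hcast,
      fold2 valores state (fun c v mm => if v ≥ valores[m] then c ++ [mm] else c) hlen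
        (valores.length - (m + 1)) (m + 1) [(0 : Int)] rfl]
  have hdropS : state.drop (m + 1) = dpSpec (valores.drop (m + 1)) := by
    rw [hstate, List.drop_append_of_le_length (by simp), List.drop_replicate]
    simp
  rw [hdropS]
  have hfoldif :
      ((valores.drop (m + 1)).zip (dpSpec (valores.drop (m + 1)))).foldl
        (fun c p => if p.1 ≥ valores[m] then c ++ [p.2] else c) [(0 : Int)]
      = [(0 : Int)] ++ (((valores.drop (m + 1)).zip (dpSpec (valores.drop (m + 1)))).filter
            (fun (p : Int × Int) => valores[m] ≤ p.1)).map (fun (p : Int × Int) => p.2) := by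
    have h := PySem.List.foldl_append_if (fun (p : Int × Int) => decide (valores[m] ≤ p.1))
      (fun (p : Int × Int) => p.2)
      ((valores.drop (m + 1)).zip (dpSpec (valores.drop (m + 1)))) [(0 : Int)]
    simpa [ge_iff_le] using h
  rw [hfoldif]
  simp only [List.singleton_append]
  rw [PySem.List.max?_id_cons]
  simp only [Option.getD_some]
  rw [hstate, PySem.List.pySetD_natCast, List.set_append, if_pos (by simp),
      List.replicate_succ', List.set_append, if_neg (by simp)]
  simp only [List.length_replicate, Nat.sub_self, List.set_cons_zero]
  rw [List.append_assoc]
  congr 1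
  rw [List.drop_eq_getElem_cons hm]
  simp [dpSpec, best]

lemma outerA (valores : List Int) :
    ∀ (m : Nat), m ≤ valores.length →
    (PySem.List.pyRange ((m : Int) - 1) (-1) (-1)).foldl
      (fun maximos inicio =>
        let candidatos :=
          (PySem.List.pyRange (inicio + 1) (valores.length : Int) 1).foldl
            (fun candidatos i =>
              if PySem.List.pyGetD valores i 0 ≥ PySem.List.pyGetD valores inicio 0 then
                candidatos ++ [PySem.List.pyGetD maximos i 0]
              else candidatos)
            [(0 : Int)]
        PySem.List.pySetD maximos inicio (1 + (PySem.List.max? candidatos (fun y => y)).getD 0))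
      (List.replicate m (0 : Int) ++ dpSpec (valores.drop m))
    = dpSpec valores := by
  intro m
  induction m with
  | zero =>
    intro _
    rw [PySem.List.pyRange_neg_one_eq_nil (by norm_num)]
    simp
  | succ m ih =>
    intro hm
    have h1 : ((m + 1 : Nat) : Int) - 1 = (m : Int) := by push_cast; ring
    rw [h1, PySem.List.pyRange_neg_one_cons (by omega), List.foldl_cons]
    have hstep := stepA_eq valores m (by omega)
      (List.replicate (m + 1) (0 : Int) ++ dpSpec (valores.drop (m + 1))) rfl
    simp only [] at hstep ⊢
    rw [hstep]
    exact ih (by omega)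

lemma A_eq_dpSpec (valores : List Int) : substring_maxima valores = dpSpec valores := by
  have := outerA valores valores.length le_rfl
  simp only [List.drop_length, dpSpec, List.append_nil] at this
  exact this

-- ----- B-side: the frontier pass computes dpSpec -----

-- queryF f x is what Source B's while-scan reads off the frontier: the length stored at the
-- first entry whose value is ≥ x (0 if there is none).
def queryF : List (Int × Int) → Int → Int
  | [], _ => 0
  | (v, m) :: rest, x => if v < x then queryF rest x else m

lemma queryF_cases (f : List (Int × Int)) (y : Int) :
    queryF f y = 0 ∨ ∃ p ∈ f, queryF f y = p.2 := by
  induction f with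
  | nil => left; rfl
  | cons p rest ih =>
    obtain ⟨v, m⟩ := p
    by_cases h : v < y
    · rcases ih with h0 | ⟨q, hq, hqe⟩
      · left; simpa [queryF, h] using h0
      · right; exact ⟨q, List.mem_cons_of_mem _ hq, by simpa [queryF, h] using hqe⟩
    · right; exact ⟨(v, m), List.mem_cons_self, by simp [queryF, h]⟩

-- Frontier invariant: values nondecreasing, lengths strictly decreasing and ≥ 1.
def FrontInv (f : List (Int × Int)) : Prop :=
  f.Pairwise (fun p q => p.1 ≤ q.1) ∧ f.Pairwise (fun p q => q.2 < p.2) ∧ ∀ p ∈ f, 1 ≤ p.2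

lemma mem_altStep (x : Int) : ∀ (f : List (Int × Int)),
    ∀ p ∈ (altStep x f).1, p = (x, (altStep x f).2) ∨ p ∈ f := by
  intro f
  induction f with
  | nil => intro p hp; simp only [altStep, List.mem_singleton] at hp; left; simp [altStep, hp]
  | cons q rest ih =>
    obtain ⟨v, m⟩ := q
    intro p hp
    by_cases h : v < x
    · simp only [altStep, if_pos h] at hp ⊢
      by_cases he : m = (altStep x rest).2
      · rw [if_pos he] at hp
        rcases ih p hp with h1 | h1
        · left; exact h1
        · right; exact List.mem_cons_of_mem _ h1
      · rw [if_neg he] at hp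
        rcases List.mem_cons.mp hp with h1 | h1
        · right; exact h1 ▸ List.mem_cons_self
        · rcases ih p h1 with h2 | h2
          · left; exact h2
          · right; exact List.mem_cons_of_mem _ h2
    · simp only [altStep, if_neg h] at hp ⊢
      rcases List.mem_cons.mp hp with h1 | h1
      · left; exact h1
      · right; exact h1

lemma altStep_snd (x : Int) (f : List (Int × Int)) :
    (altStep x f).2 = 1 + queryF f x := by
  induction f with
  | nil => simp [altStep, queryF]
  | cons q rest ih =>
    obtain ⟨v, m⟩ := q
    by_cases h : v < x
    · simp [altStep, queryF, h, ih]
    · simp [altStep, queryF, h]; omega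

lemma altStep_main (x : Int) : ∀ (f : List (Int × Int)), FrontInv f →
    (∀ y, queryF (altStep x f).1 y =
        if y ≤ x then max (altStep x f).2 (queryF f y) else queryF f y)
    ∧ FrontInv (altStep x f).1 := by
  intro f
  induction f with
  | nil =>
    intro _
    refine ⟨fun y => ?_, by simp [altStep], by simp [altStep], ?_⟩
    · by_cases hy : y ≤ x
      · simp [altStep, queryF, hy, not_lt.mpr hy]
      · simp [altStep, queryF, hy, not_le.mp hy]
    · intro p hp; simp only [altStep, List.mem_singleton] at hp; simp [hp]
  | cons q rest ih =>
    obtain ⟨v, m⟩ := q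
    rintro ⟨h1, h2, h3⟩
    have hva : ∀ p ∈ rest, v ≤ p.1 := (List.pairwise_cons.mp h1).1
    have h1r := (List.pairwise_cons.mp h1).2
    have hma : ∀ p ∈ rest, p.2 < m := (List.pairwise_cons.mp h2).1
    have h2r := (List.pairwise_cons.mp h2).2
    have hm1 : 1 ≤ m := h3 (v, m) List.mem_cons_self
    have h3r : ∀ p ∈ rest, 1 ≤ p.2 := fun p hp => h3 p (List.mem_cons_of_mem _ hp)
    by_cases hvx : v < x
    · obtain ⟨ihq, ihInv⟩ := ih ⟨h1r, h2r, h3r⟩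
      have hd : (altStep x rest).2 = 1 + queryF rest x := altStep_snd x rest
      have hd_le : (altStep x rest).2 ≤ m := by
        rcases queryF_cases rest x with h0 | ⟨p, hp, he⟩
        · omega
        · have := hma p hp; omega
      have hqle : ∀ y, queryF rest y ≤ m := by
        intro y
        rcases queryF_cases rest y with h0 | ⟨p, hp, he⟩
        · omega
        · have := hma p hp; omega
      by_cases he : m = (altStep x rest).2
      · constructor
        · intro y
          simp only [altStep, if_pos he, if_pos hvx]
          rw [ihq y]
          by_cases hy : y ≤ x
          · rw [if_pos hy, if_pos hy]
            by_cases hvy : v < y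
            · simp [queryF, hvy]
            · simp only [queryF, if_neg hvy]
              have := hqle y
              omega
          · rw [if_neg hy, if_neg hy]
            have hvy : v < y := lt_trans hvx (not_le.mp hy)
            simp [queryF, hvy]
        · simpa only [altStep, if_pos he, if_pos hvx] using ihInv
      · have hdm : (altStep x rest).2 < m := lt_of_le_of_ne hd_le (fun hh => he hh.symm)
        constructor
        · intro y
          simp only [altStep, if_neg he, if_pos hvx]
          by_cases hvy : v < y
          · simp only [queryF, if_pos hvy]
            rw [ihq y]
          · have hy : y ≤ x := le_trans (not_lt.mp hvy) (le_of_lt hvx)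
            simp only [queryF, if_neg hvy, if_pos hy]
            omega
        · obtain ⟨i1, i2, i3⟩ := ihInv
          have hmem := mem_altStep x rest
          simp only [altStep, if_pos hvx, if_neg he] at i1 i2 i3 hmem ⊢
          refine ⟨List.pairwise_cons.mpr ⟨?_, i1⟩, List.pairwise_cons.mpr ⟨?_, i2⟩, ?_⟩
          · intro p hp
            rcases hmem p hp with h' | h'
            · rw [h']; exact le_of_lt hvx
            · exact hva p h'
          · intro p hp
            rcases hmem p hp with h' | h'
            · rw [h']; exact hdm
            · exact hma p h'
          · intro p hp
            rcases List.mem_cons.mp hp with h' | h'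
            · rw [h']; exact hm1
            · exact i3 p h'
    · constructor
      · intro y
        by_cases hy : y ≤ x
        · have hvy : ¬ v < y := not_lt.mpr (le_trans hy (not_lt.mp hvx))
          have hxy : ¬ x < y := not_lt.mpr hy
          simp only [altStep, if_neg hvx, queryF, if_neg hxy, if_neg hvy, if_pos hy]
          omega
        · have hxy : x < y := not_le.mp hy
          simp [altStep, if_neg hvx, queryF, hxy, hy]
      · have hxa : ∀ p ∈ rest, x ≤ p.1 := fun p hp => le_trans (not_lt.mp hvx) (hva p hp)
        have hmb : ∀ p ∈ rest, p.2 < m + 1 := fun p hp => lt_trans (hma p hp) (by omega)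
        refine ⟨?_, ?_, ?_⟩
        · simp only [altStep, if_neg hvx]
          refine List.pairwise_cons.mpr ⟨?_, h1⟩
          intro p hp
          rcases List.mem_cons.mp hp with h' | h'
          · rw [h']; exact not_lt.mp hvx
          · exact hxa p h'
        · simp only [altStep, if_neg hvx]
          refine List.pairwise_cons.mpr ⟨?_, h2⟩
          intro p hp
          rcases List.mem_cons.mp hp with h' | h'
          · rw [h']; omega
          · exact hmb p h'
        · simp only [altStep, if_neg hvx]
          intro p hp
          rcases List.mem_cons.mp hp with h' | h'
          · rw [h']; omega
          · exact h3 p h'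

lemma loopB (l : List Int) :
    (l.foldr (fun x st => ((altStep x st.1).1, st.2 ++ [(altStep x st.1).2]))
        (([], []) : List (Int × Int) × List Int)).2 = (dpSpec l).reverse
    ∧ FrontInv (l.foldr (fun x st => ((altStep x st.1).1, st.2 ++ [(altStep x st.1).2]))
        (([], []) : List (Int × Int) × List Int)).1
    ∧ ∀ y, queryF (l.foldr (fun x st => ((altStep x st.1).1, st.2 ++ [(altStep x st.1).2]))
        (([], []) : List (Int × Int) × List Int)).1 y = best y (l.zip (dpSpec l)) := by
  induction l with
  | nil =>
    refine ⟨rfl, ⟨List.Pairwise.nil, List.Pairwise.nil, by simp⟩, fun y => by simp [queryF, best, dpSpec]⟩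
  | cons x xs ih =>
    obtain ⟨hres, hInv, hq⟩ := ih
    obtain ⟨hstepq, hstepInv⟩ := altStep_main x _ hInv
    have hd : (altStep x (xs.foldr (fun x st => ((altStep x st.1).1, st.2 ++ [(altStep x st.1).2]))
        (([], []) : List (Int × Int) × List Int)).1).2 = 1 + best x (xs.zip (dpSpec xs)) := by
      rw [altStep_snd, hq x]
    refine ⟨?_, hstepInv, ?_⟩
    · simp only [List.foldr_cons, hres, hd, dpSpec, List.reverse_cons]
    · intro y
      simp only [List.foldr_cons]
      rw [hstepq y, hd]
      simp only [dpSpec, List.zip_cons_cons]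
      by_cases hy : y ≤ x
      · rw [if_pos hy]
        rw [hq y]
        unfold best
        rw [List.filter_cons, if_pos (by simpa using hy)]
        simp only [List.map_cons, List.foldl_cons]
        rw [foldl_max_pull]
      · rw [if_neg hy, hq y]
        unfold best
        rw [List.filter_cons, if_neg (by simpa using hy)]

lemma B_eq_dpSpec (valores : List Int) : substring_maxima_alt valores = dpSpec valores := by
  show ((valores.reverse.foldl
      (fun (st : List (Int × Int) × List Int) x =>
        let r := altStep x st.1
        (r.1, st.2 ++ [r.2]))
      (([], []) : List (Int × Int) × List Int)).2).reverse = dpSpec valores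
  rw [List.foldl_reverse]
  have h := (loopB valores).1
  rw [show (valores.foldr (fun x (st : List (Int × Int) × List Int) =>
        let r := altStep x st.1
        (r.1, st.2 ++ [r.2])) (([], []) : List (Int × Int) × List Int))
      = (valores.foldr (fun x st => ((altStep x st.1).1, st.2 ++ [(altStep x st.1).2]))
        (([], []) : List (Int × Int) × List Int)) from rfl, h, List.reverse_reverse]

-- ===== VERDICT (by name: the statement is the Claim_ definition above) =====
theorem substring_maxima_spec : Claim_equal_substring_maxima := by
  intro valores _
  unfold Spec_substring_maxima
  rw [A_eq_dpSpec, B_eq_dpSpec]
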